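-- pv_equiv track=rewrite | github.com/snelliott/autoio | mess_io/reader/new_rates.py | filter_reactions
-- ===== SOURCE A (Python) =====
-- def filter_reactions(rxns,
--                      filter_fake=True,
--                      filter_self=True,
--                      filter_loss=True,
--                      filter_capture=True,
--                      filter_reverse=True):
--     """ Filter the reactions from a ktp dictionary
--         Leaving this function here for the sake of _wellextend.py
--     """
--
--     filt_rxns = ()
--     for rxn in rxns:
--         rct, prd, tbody = rxn
--         if prd == ('Loss',):
--             if filter_loss:
--                 continue
--         if prd == ('Capture',):
--             if filter_capture:
--                 continue
--         # if (
--         #     any('F' in rgt for rgt in rct+prd)  or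
--         #     any('FW' in rgt for rgt in rct+prd)
--         # ):
--         if any('Fake' in rgt for rgt in rct+prd):
--             if filter_fake:
--                 continue
--         if rct == prd:
--             if filter_self:
--                 continue
--         if filter_reverse:
--             if (prd, rct, tbody) in filt_rxns:
--                 continue
--         # If continues not hit, reaction good to be added to new dct
--         filt_rxns += (rxn,)
--
--     return filt_rxns
-- ===== SOURCE B (Python) =====
-- def filter_reactions(rxns,
--                      filter_fake=True,
--                      filter_self=True,
--                      filter_loss=True,
--                      filter_capture=True,
--                      filter_reverse=True):
--     """Positional rewrite: after the type filters, the reverse-duplicate decision is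
--     a pure function of precomputed first-occurrence indices (no evolving accepted set):
--     keep a survivor iff the first occurrence of its reverse key does not precede its
--     own first occurrence (and, for self-reverse keys, keep only the first occurrence)."""
--     def passes(rxn):
--         rct, prd, tbody = rxn
--         return not (filter_loss and prd == ('Loss',)
--                     or filter_capture and prd == ('Capture',)
--                     or filter_fake and any('Fake' in rgt for rgt in rct + prd)
--                     or filter_self and rct == prd)
--
--     survivors = [rxn for rxn in rxns if passes(rxn)]
--     if not filter_reverse:
--         return tuple(survivors)
--
--     n = len(survivors)
--     first = {}
--     for i, rxn in enumerate(survivors):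
--         first.setdefault(rxn, i)
--
--     def fidx(key):
--         return first.get(key, n)
--
--     return tuple(rxn for i, rxn in enumerate(survivors)
--                  if fidx((rxn[1], rxn[0], rxn[2])) > fidx(rxn)
--                  or fidx((rxn[1], rxn[0], rxn[2])) == i)
-- ===== Notes on version B (the rewrite author's own statement) =====
-- stated objective: alternative
-- what changed: Replaces A's stateful dedup (membership test of the reverse key against the growing result) by a stateless positional rule: precompute each key's first-occurrence index among the type-filtered reactions, then keep a survivor iff its reverse key's first occurrence does not precede its own (self-reverse keys: first occurrence only); the type filters become one boolean predicate pass.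
import Mathlib
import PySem

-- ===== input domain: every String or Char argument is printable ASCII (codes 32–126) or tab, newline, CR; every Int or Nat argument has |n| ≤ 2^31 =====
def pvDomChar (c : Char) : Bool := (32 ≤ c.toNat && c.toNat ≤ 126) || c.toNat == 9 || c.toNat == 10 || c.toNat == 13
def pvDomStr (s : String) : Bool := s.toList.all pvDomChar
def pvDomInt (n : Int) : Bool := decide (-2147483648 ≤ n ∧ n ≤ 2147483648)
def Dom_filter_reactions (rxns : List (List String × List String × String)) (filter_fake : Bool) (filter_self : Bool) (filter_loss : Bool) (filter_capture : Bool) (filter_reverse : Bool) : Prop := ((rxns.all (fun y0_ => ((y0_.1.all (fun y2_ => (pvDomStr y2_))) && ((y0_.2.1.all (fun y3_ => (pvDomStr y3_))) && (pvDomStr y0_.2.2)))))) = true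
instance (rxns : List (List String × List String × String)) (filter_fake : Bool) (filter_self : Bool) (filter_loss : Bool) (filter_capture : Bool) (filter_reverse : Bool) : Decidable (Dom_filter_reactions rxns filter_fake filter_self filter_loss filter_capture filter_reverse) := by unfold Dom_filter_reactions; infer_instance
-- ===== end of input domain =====

-- B replaces A's stateful reverse-duplicate removal (membership of the reverse key in the growing
-- result) by a stateless positional rule over precomputed first-occurrence indices; objective:
-- alternative algorithm, same results.

-- ===== PORT A =====
-- A's loop body (the chain of `continue` guards), one fold step
def pvAStep (filter_fake : Bool) (filter_self : Bool) (filter_loss : Bool) (filter_capture : Bool) (filter_reverse : Bool)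
    (filt_rxns : List (List String × List String × String)) (rxn : List String × List String × String) :
    List (List String × List String × String) :=
  let rct := rxn.1
  let prd := rxn.2.1
  let tbody := rxn.2.2
  if prd == ["Loss"] && filter_loss then filt_rxns
  else if prd == ["Capture"] && filter_capture then filt_rxns
  else if ((rct ++ prd).any (fun rgt => PySem.Str.isIn "Fake" rgt)) && filter_fake then filt_rxns
  else if rct == prd && filter_self then filt_rxns
  else if filter_reverse && (filt_rxns.contains (prd, rct, tbody)) then filt_rxns
  else filt_rxns ++ [rxn]

def filter_reactions (rxns : List (List String × List String × String)) (filter_fake : Bool) (filter_self : Bool) (filter_loss : Bool) (filter_capture : Bool) (filter_reverse : Bool) : List (List String × List String × String) :=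
  rxns.foldl (pvAStep filter_fake filter_self filter_loss filter_capture filter_reverse) []

-- ===== PORT B =====
-- Source B's passes() predicate (the type filters as one boolean expression)
def pvPasses (filter_fake : Bool) (filter_self : Bool) (filter_loss : Bool) (filter_capture : Bool)
    (rxn : List String × List String × String) : Bool :=
  !((filter_loss && rxn.2.1 == ["Loss"]) ||
    (filter_capture && rxn.2.1 == ["Capture"]) ||
    (filter_fake && (rxn.1 ++ rxn.2.1).any (fun rgt => PySem.Str.isIn "Fake" rgt)) ||
    (filter_self && rxn.1 == rxn.2.1))

-- the reverse key (rxn[1], rxn[0], rxn[2])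
def pvRev (r : List String × List String × String) : List String × List String × String :=
  (r.2.1, r.1, r.2.2)

-- Source B's first-occurrence dict: for i, rxn in enumerate(survivors): first.setdefault(rxn, i)
def pvFirst (s : List (List String × List String × String)) : PySem.Dict (List String × List String × String) Int :=
  (PySem.List.enumerate s 0).foldl (fun d p => d.setdefault p.2 p.1) PySem.Dict.empty

-- Source B's fidx(key) = first.get(key, n)
def pvFidx (first : PySem.Dict (List String × List String × String) Int) (n : Int)
    (key : List String × List String × String) : Int :=
  first.getD key n

def filter_reactions_alt (rxns : List (List String × List String × String)) (filter_fake : Bool) (filter_self : Bool) (filter_loss : Bool) (filter_capture : Bool) (filter_reverse : Bool) : List (List String × List String × String) :=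
  let survivors := rxns.filter (pvPasses filter_fake filter_self filter_loss filter_capture)
  if !filter_reverse then survivors
  else
    let n : Int := survivors.length
    let first := pvFirst survivors
    ((PySem.List.enumerate survivors 0).filter (fun p =>
        decide (pvFidx first n (pvRev p.2) > pvFidx first n p.2) ||
        (pvFidx first n (pvRev p.2) == p.1))).map (fun p => p.2)

-- ===== PRECONDITION & SPEC =====
def Spec_filter_reactions (rxns : List (List String × List String × String)) (filter_fake : Bool) (filter_self : Bool) (filter_loss : Bool) (filter_capture : Bool) (filter_reverse : Bool) (out : List (List String × List String × String)) : Prop := out = filter_reactions_alt rxns filter_fake filter_self filter_loss filter_capture filter_reverse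
instance (rxns : List (List String × List String × String)) (filter_fake : Bool) (filter_self : Bool) (filter_loss : Bool) (filter_capture : Bool) (filter_reverse : Bool) (out : List (List String × List String × String)) : Decidable (Spec_filter_reactions rxns filter_fake filter_self filter_loss filter_capture filter_reverse out) := by unfold Spec_filter_reactions; infer_instance

-- ===== CLAIM (what is proved, stated in full; the proofs are below) =====
def Claim_equal_filter_reactions : Prop := ∀ (rxns : List (List String × List String × String)) (filter_fake : Bool) (filter_self : Bool) (filter_loss : Bool) (filter_capture : Bool) (filter_reverse : Bool), Dom_filter_reactions rxns filter_fake filter_self filter_loss filter_capture filter_reverse → Spec_filter_reactions rxns filter_fake filter_self filter_loss filter_capture filter_reverse (filter_reactions rxns filter_fake filter_self filter_loss filter_capture filter_reverse)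

-- ===== LEMMAS AND PROOFS =====

-- A's step, rephrased through B's passes predicate
theorem pvAStep_eq (ff fs fl fc fr : Bool) (acc : List (List String × List String × String))
    (rxn : List String × List String × String) :
    pvAStep ff fs fl fc fr acc rxn =
      if pvPasses ff fs fl fc rxn then
        (if fr && acc.contains (pvRev rxn) then acc else acc ++ [rxn])
      else acc := by
  rcases rxn with ⟨rct, prd, tbody⟩
  simp only [pvAStep, pvPasses, pvRev]
  generalize (prd == ["Loss"]) = c1
  generalize (prd == ["Capture"]) = c2
  generalize ((rct ++ prd).any (fun rgt => PySem.Str.isIn "Fake" rgt)) = c3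
  generalize (rct == prd) = c4
  cases fl <;> cases fc <;> cases ff <;> cases fs <;>
    cases c1 <;> cases c2 <;> cases c3 <;> cases c4 <;> simp

-- filter_reverse = false: A's fold just appends the passing reactions
theorem pvFoldA_false (ff fs fl fc : Bool) :
    ∀ (l acc : List (List String × List String × String)),
      l.foldl (pvAStep ff fs fl fc false) acc = acc ++ l.filter (pvPasses ff fs fl fc) := by
  intro l
  induction l with
  | nil => intro acc; simp
  | cons rxn rest ih =>
    intro acc
    simp only [List.foldl_cons, List.filter_cons, pvAStep_eq]
    by_cases hk : pvPasses ff fs fl fc rxn = true <;> simp [hk, ih]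

-- A's inner dedup step (what pvAStep does, with filter_reverse = True, to a passing reaction)
def pvStepDedup (acc : List (List String × List String × String))
    (r : List String × List String × String) : List (List String × List String × String) :=
  if acc.contains (pvRev r) then acc else acc ++ [r]

-- filter_reverse = true: A's fold is the dedup fold over the passing reactions
theorem pvFoldA_true_filter (ff fs fl fc : Bool) :
    ∀ (l acc : List (List String × List String × String)),
      l.foldl (pvAStep ff fs fl fc true) acc = (l.filter (pvPasses ff fs fl fc)).foldl pvStepDedup acc := by
  intro l
  induction l with
  | nil => intro acc; simp
  | cons rxn rest ih =>
    intro acc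
    simp only [List.foldl_cons, List.filter_cons, pvAStep_eq]
    by_cases hk : pvPasses ff fs fl fc rxn = true <;>
      simp [hk, ih, pvStepDedup, List.foldl_cons]

-- the first-occurrence index as a total function (none ↦ length), proof-side view of fidx
def pvF (s : List (List String × List String × String)) (k : List String × List String × String) : Int :=
  match PySem.List.index? s k with
  | some m => (m : Int)
  | none => (s.length : Int)

theorem pvRev_rev (r : List String × List String × String) : pvRev (pvRev r) = r := rfl

-- first.setdefault fold computes the first index
theorem pvFirstAux (s : List (List String × List String × String)) :
    ∀ (j : Int) (d : PySem.Dict (List String × List String × String) Int)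
      (k : List String × List String × String),
      ((PySem.List.enumerate s j).foldl (fun d p => d.setdefault p.2 p.1) d).get? k
        = (d.get? k).or ((PySem.List.index? s k).map (fun m => j + m)) := by
  induction s with
  | nil => intro j d k; simp [PySem.List.enumerate_nil]
  | cons x t ih =>
    intro j d k
    rw [PySem.List.enumerate_cons]
    simp only [List.foldl_cons]
    rw [ih (j + 1)]
    by_cases hk : x = k
    · subst hk
      rw [PySem.Dict.get?_setdefault_self]
      rw [PySem.List.index?_cons_self]
      cases hd : d.get? x <;> simp [Option.or]
    · have hget : (d.setdefault x j).get? k = d.get? k := by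
        by_cases hc : d.contains x = true
        · rw [PySem.Dict.setdefault_of_contains _ _ hc]
        · rw [PySem.Dict.setdefault_of_not_contains _ _ (by simp [hc])]
          exact PySem.Dict.get?_insert_of_ne _ _ (fun h => hk h.symm)
      rw [hget, PySem.List.index?_cons_of_ne _ hk]
      cases hd : d.get? k
      · cases hidx : PySem.List.index? t k <;> simp [Option.or]; omega
      · simp [Option.or]

theorem pvFidx_first_eq (s : List (List String × List String × String))
    (k : List String × List String × String) :
    pvFidx (pvFirst s) (s.length : Int) k = pvF s k := by
  unfold pvFidx pvFirst pvF PySem.Dict.getD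
  rw [pvFirstAux s 0 PySem.Dict.empty k]
  cases hidx : PySem.List.index? s k <;> simp [Option.or, PySem.Dict.get?, PySem.Dict.empty]

-- kept keys: those whose first occurrence is not preceded by their reverse's first occurrence
def pvKept (s : List (List String × List String × String))
    (k : List String × List String × String) : Prop :=
  pvF s k ≤ pvF s (pvRev k)

-- index? facts specialised to an append split
theorem pvIndex?_append_of_not_mem {α : Type} [BEq α] [LawfulBEq α] :
    ∀ (p : List α) (u : List α) (v : α), v ∉ p →
      PySem.List.index? (p ++ u) v = (PySem.List.index? u v).map (· + p.length) := by
  intro p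
  induction p with
  | nil => intro u v _; simp [Option.map_id']
  | cons x q ih =>
    intro u v hv
    have hxv : x ≠ v := by intro h; exact hv (by simp [h])
    rw [List.cons_append, PySem.List.index?_cons_of_ne _ hxv, ih u v (by intro h; exact hv (by simp [h]))]
    cases PySem.List.index? u v <;> simp; omega

theorem pvIndex?_of_mem_prefix {α : Type} [BEq α] [LawfulBEq α]
    (p u : List α) (v : α) (hv : v ∈ p) :
    ∃ m, PySem.List.index? (p ++ u) v = some m ∧ m < p.length := by
  have hsome : (PySem.List.index? p v).isSome = true := (PySem.List.index?_isSome_iff _ _).mpr hv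
  obtain ⟨m, hm⟩ := Option.isSome_iff_exists.mp hsome
  obtain ⟨hlt, _, _⟩ := PySem.List.getElem_of_index?_eq_some hm
  exact ⟨m, by rw [PySem.List.index?_append_of_mem _ hv]; exact hm, hlt⟩

-- the element at a split point bounds its first index
theorem pvIndex?_le_split {α : Type} [BEq α] [LawfulBEq α]
    (p u : List α) (r : α) :
    ∃ m, PySem.List.index? (p ++ r :: u) r = some m ∧ m ≤ p.length := by
  have hmem : r ∈ p ++ r :: u := by simp
  have hsome := (PySem.List.index?_isSome_iff (p ++ r :: u) r).mpr hmem
  obtain ⟨m, hm⟩ := Option.isSome_iff_exists.mp hsome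
  obtain ⟨hlt, helem, hmin⟩ := PySem.List.getElem_of_index?_eq_some hm
  refine ⟨m, hm, ?_⟩
  by_contra hgt
  have hgt' : p.length < m := by omega
  have hplen : p.length < (p ++ r :: u).length := by simp
  have hval : (p ++ r :: u)[p.length] = r := by
    rw [List.getElem_append_right (le_refl p.length)]
    simp
  exact hmin p.length hgt' hval

-- main dedup lemma: the stateful fold equals the positional filter
theorem pvDedup_positional (s : List (List String × List String × String)) :
    ∀ (t p acc : List (List String × List String × String)),
      s = p ++ t →
      (∀ k, k ∈ acc ↔ (k ∈ p ∧ pvKept s k)) →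
      t.foldl pvStepDedup acc
        = acc ++ ((PySem.List.enumerate t (p.length : Int)).filter (fun q =>
            decide (pvF s (pvRev q.2) > pvF s q.2) || (pvF s (pvRev q.2) == q.1))).map (fun q => q.2) := by
  intro t
  induction t with
  | nil => intro p acc _ _; simp [PySem.List.enumerate_nil]
  | cons r t' ih =>
    intro p acc hs hinv
    obtain ⟨m', hm', hm'le⟩ := pvIndex?_le_split p t' r
    rw [← hs] at hm'
    have hFr : pvF s r = (m' : Int) := by unfold pvF; rw [hm']
    have hm'lt : m' < s.length := by
      obtain ⟨hlt, _, _⟩ := PySem.List.getElem_of_index?_eq_some hm'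
      exact hlt
    rw [PySem.List.enumerate_cons, List.foldl_cons, List.filter_cons]
    by_cases hc : pvRev r ∈ acc
    · -- the reverse key was already accepted: A skips r, and the positional rule rejects it
      obtain ⟨hmemp, hkept⟩ := (hinv (pvRev r)).mp hc
      obtain ⟨m, hm, hmlt⟩ := pvIndex?_of_mem_prefix p (r :: t') (pvRev r) hmemp
      rw [← hs] at hm
      have hFrev : pvF s (pvRev r) = (m : Int) := by unfold pvF; rw [hm]
      have hkle : (m : Int) ≤ (m' : Int) := by
        have := hkept
        unfold pvKept at this
        rw [pvRev_rev, hFrev, hFr] at this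
        exact this
      have hstep : pvStepDedup acc r = acc := by
        unfold pvStepDedup
        have hct : acc.contains (pvRev r) = true := List.elem_eq_true_of_mem hc
        rw [hct]
        simp
      have hpred : (decide (pvF s (pvRev r) > pvF s r) || (pvF s (pvRev r) == (p.length : Int))) = false := by
        rw [hFrev, hFr]
        simp only [Bool.or_eq_false_iff, decide_eq_false_iff_not, beq_eq_false_iff_ne, ne_eq]
        constructor <;> [omega; (intro h; omega)]
      rw [hstep, hpred]
      have hinv' : ∀ k, k ∈ acc ↔ (k ∈ p ++ [r] ∧ pvKept s k) := by
        intro k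
        by_cases hk : k = r
        · subst hk
          simp only [List.mem_append, List.mem_singleton, or_true, true_and]
          constructor
          · intro hka; exact ((hinv k).mp hka).2
          · intro hkk
            have hmeq : m = m' := by
              have : (m' : Int) ≤ (m : Int) := by
                have := hkk; unfold pvKept at this; rw [hFrev, hFr] at this; exact this
              omega
            have hrrev : pvRev k = k := by
              rw [hmeq] at hm
              obtain ⟨hlt1, he1, _⟩ := PySem.List.getElem_of_index?_eq_some hm
              obtain ⟨hlt2, he2, _⟩ := PySem.List.getElem_of_index?_eq_some hm'
              rw [← he1]
              exact he2
            exact (hinv k).mpr ⟨by rw [← hrrev]; exact hmemp, hkk⟩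
        · constructor
          · intro hka
            obtain ⟨h1, h2⟩ := (hinv k).mp hka
            exact ⟨List.mem_append_left _ h1, h2⟩
          · intro ⟨h1, h2⟩
            rcases List.mem_append.mp h1 with h1p | h1r
            · exact (hinv k).mpr ⟨h1p, h2⟩
            · exact absurd (List.mem_singleton.mp h1r) hk
      rw [ih (p ++ [r]) acc (by rw [hs]; simp) hinv']
      simp
    · -- the reverse key is not yet accepted: A appends r, and the positional rule keeps it
      have hnk : ¬(pvRev r ∈ p ∧ pvKept s (pvRev r)) := fun h => hc ((hinv (pvRev r)).mpr h)
      have hmain : ((decide (pvF s (pvRev r) > pvF s r) || (pvF s (pvRev r) == (p.length : Int))) = true)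
          ∧ pvKept s r := by
        by_cases hp : pvRev r ∈ p
        · obtain ⟨m, hm, hmlt⟩ := pvIndex?_of_mem_prefix p (r :: t') (pvRev r) hp
          rw [← hs] at hm
          have hFrev : pvF s (pvRev r) = (m : Int) := by unfold pvF; rw [hm]
          have hnkept : ¬ pvKept s (pvRev r) := fun h => hnk ⟨hp, h⟩
          have hlt : (m' : Int) < (m : Int) := by
            unfold pvKept at hnkept
            rw [pvRev_rev, hFrev, hFr] at hnkept
            omega
          constructor
          · simp only [Bool.or_eq_true, decide_eq_true_eq]
            left; rw [hFrev, hFr]; omega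
          · unfold pvKept; rw [hFrev, hFr]; omega
        · have hidx : PySem.List.index? s (pvRev r)
              = (PySem.List.index? (r :: t') (pvRev r)).map (· + p.length) := by
            rw [hs]; exact pvIndex?_append_of_not_mem p (r :: t') (pvRev r) hp
          by_cases hrr : pvRev r = r
          · have hFrev : pvF s (pvRev r) = (m' : Int) := by rw [hrr, hFr]
            have hm'eq : m' = p.length := by
              rw [hrr, hm'] at hidx
              rw [PySem.List.index?_cons_self] at hidx
              simp at hidx
              omega
            constructor
            · simp only [Bool.or_eq_true, beq_iff_eq]
              right; rw [hFrev, hm'eq]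
            · unfold pvKept; rw [hFrev, hFr]
          · have hne : r ≠ pvRev r := fun h => hrr h.symm
            rw [PySem.List.index?_cons_of_ne _ hne] at hidx
            cases hit : PySem.List.index? t' (pvRev r) with
            | none =>
              have hFrev : pvF s (pvRev r) = (s.length : Int) := by
                unfold pvF; rw [hidx, hit]; simp
              constructor
              · simp only [Bool.or_eq_true, decide_eq_true_eq]
                left; rw [hFrev, hFr]; omega
              · unfold pvKept; rw [hFrev, hFr]; omega
            | some q =>
              have hFrev : pvF s (pvRev r) = ((q + 1 + p.length : Nat) : Int) := by
                unfold pvF; rw [hidx, hit]; simp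
              constructor
              · simp only [Bool.or_eq_true, decide_eq_true_eq]
                left; rw [hFrev, hFr]; push_cast; omega
              · unfold pvKept; rw [hFrev, hFr]; push_cast; omega
      obtain ⟨hpred, hkr⟩ := hmain
      have hstep : pvStepDedup acc r = acc ++ [r] := by
        unfold pvStepDedup
        have : acc.contains (pvRev r) = false := by
          by_contra h
          exact hc (List.mem_of_elem_eq_true (by simpa using h))
        rw [this]
        simp
      rw [hstep, hpred]
      have hinv' : ∀ k, k ∈ acc ++ [r] ↔ (k ∈ p ++ [r] ∧ pvKept s k) := by
        intro k
        by_cases hk : k = r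
        · subst hk
          simp [hkr]
        · simp only [List.mem_append, List.mem_singleton, hk, or_false]
          exact hinv k
      rw [ih (p ++ [r]) (acc ++ [r]) (by rw [hs]; simp) hinv']
      simp

-- ===== VERDICT (by name: the statement is the Claim_ definition above) =====
theorem filter_reactions_spec : Claim_equal_filter_reactions := by
  intro rxns ff fs fl fc fr _
  unfold Spec_filter_reactions filter_reactions filter_reactions_alt
  cases fr
  · simpa using pvFoldA_false ff fs fl fc rxns []
  · simp only [Bool.not_true, if_false, Bool.false_eq_true]
    rw [pvFoldA_true_filter]
    rw [pvDedup_positional (rxns.filter (pvPasses ff fs fl fc)) (rxns.filter (pvPasses ff fs fl fc)) [] [] rfl (by simp)]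
    simp only [List.nil_append, List.length_nil]
    apply congrArg
    apply List.filter_congr
    intro q _
    simp [pvFidx_first_eq]
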